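-- pv_equiv track=rewrite | github.com/baites/examples | coding/codeforces/preparation-for-international-women-day/solution.py | solve
-- ===== SOURCE A (Python) =====
-- def solve(d, k):
--     modcount = [0]*k
--     for x in d:
--         mod = x % k
--         modcount[mod] += 1
--     nboxes = 0
--     for i in range(k):
--         for j in range(i, k):
--             if (i + j) % k != 0 or\
--                 modcount[i] == 0 or\
--                     modcount[j] == 0:
--                 continue
--             if i == j:
--                 boxes = modcount[i]//2
--             else:
--                 boxes = min(modcount[i], modcount[j])
--             modcount[i] -= boxes
--             modcount[j] -= boxes
--             nboxes += 2 * boxes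
--     return nboxes
-- ===== SOURCE B (Python) =====
-- def solve(d, k):
--     cnt = {}
--     for x in d:
--         r = x % k
--         cnt[r] = cnt.get(r, 0) + 1
--     total = 2 * (cnt.get(0, 0) // 2)
--     if k % 2 == 0:
--         total += 2 * (cnt.get(k // 2, 0) // 2)
--     for i in range(1, (k + 1) // 2):
--         total += 2 * min(cnt.get(i, 0), cnt.get(k - i, 0))
--     return total
-- ===== Notes on version B (the rewrite author's own statement) =====
-- stated objective: faster
-- what changed: Replaces A's k*k double scan over residue pairs (with in-place decrements of the count array) by a residue-counting dict and a single closed-form pass over i in [1,(k+1)//2) pairing residue i with k-i, plus the two self-paired classes 0 and k/2.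
import Mathlib
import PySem

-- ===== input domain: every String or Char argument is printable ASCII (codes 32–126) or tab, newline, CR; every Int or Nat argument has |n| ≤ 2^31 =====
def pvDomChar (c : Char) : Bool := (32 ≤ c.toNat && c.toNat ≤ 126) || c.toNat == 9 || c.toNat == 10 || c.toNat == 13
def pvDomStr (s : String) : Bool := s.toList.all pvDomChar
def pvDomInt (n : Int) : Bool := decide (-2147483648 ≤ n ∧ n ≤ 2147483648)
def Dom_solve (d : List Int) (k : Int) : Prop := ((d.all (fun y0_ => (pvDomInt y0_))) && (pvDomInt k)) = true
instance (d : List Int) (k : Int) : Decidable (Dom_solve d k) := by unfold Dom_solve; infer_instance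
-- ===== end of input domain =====

-- B replaces A's O(k^2) double scan with decrements by one O(k) closed-form pass over residue pairs (i, k-i).

-- ===== PORT A =====
-- 'modcount = [0]*k; for x in d: modcount[x % k] += 1'
-- (index x % k lies in [0, k) under Pre_, so .toNat indexing is exact there)
def solveCount (d : List Int) (k : Int) : List Int :=
  d.foldl (fun mc x =>
    let m := (PySem.Int.mod x k).toNat
    mc.set m (mc.getD m 0 + 1)) (List.replicate k.toNat 0)

-- the body of A's inner 'for j in range(i, k)' loop, acting on the state (modcount, nboxes)
def innerBody (k i : Int) (st : List Int × Int) (j : Int) : List Int × Int :=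
  if PySem.Int.mod (i + j) k ≠ 0 ∨ st.1.getD i.toNat 0 = 0 ∨ st.1.getD j.toNat 0 = 0 then st
  else
    let boxes := if i = j then PySem.Int.floordiv (st.1.getD i.toNat 0) 2
                 else min (st.1.getD i.toNat 0) (st.1.getD j.toNat 0)
    let mc1 := st.1.set i.toNat (st.1.getD i.toNat 0 - boxes)
    let mc2 := mc1.set j.toNat (mc1.getD j.toNat 0 - boxes)
    (mc2, st.2 + 2 * boxes)

-- the inner 'for j in range(i, k)' loop of A
def solveInner (k i : Int) (st : List Int × Int) : List Int × Int :=
  (PySem.List.pyRange i k 1).foldl (innerBody k i) st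

def solve (d : List Int) (k : Int) : Int :=
  ((PySem.List.pyRange 0 k 1).foldl (fun st i => solveInner k i st)
    (solveCount d k, 0)).2

-- ===== PORT B =====
-- 'cnt = {}; for x in d: cnt[x % k] = cnt.get(x % k, 0) + 1'
def altCount (d : List Int) (k : Int) : PySem.Dict Int Int :=
  d.foldl (fun c x =>
    let r := PySem.Int.mod x k
    c.insert r (c.getD r 0 + 1)) PySem.Dict.empty

def solve_alt (d : List Int) (k : Int) : Int :=
  let cnt := altCount d k
  let total := 2 * PySem.Int.floordiv (cnt.getD 0 0) 2
  let total := if PySem.Int.mod k 2 = 0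
               then total + 2 * PySem.Int.floordiv (cnt.getD (PySem.Int.floordiv k 2) 0) 2
               else total
  (PySem.List.pyRange 1 (PySem.Int.floordiv (k + 1) 2) 1).foldl
    (fun t i => t + 2 * min (cnt.getD i 0) (cnt.getD (k - i) 0)) total

-- ===== PRECONDITION & SPEC =====
-- Pre_ excludes exactly the inputs where A raises: for k ≤ 0 and nonempty d, Python A raises
-- (ZeroDivisionError on x % 0, or IndexError on the empty list [0]*k); A returns on everything else.
def Pre_solve (d : List Int) (k : Int) : Prop := 1 ≤ k ∨ d = []
instance (d : List Int) (k : Int) : Decidable (Pre_solve d k) := by unfold Pre_solve; infer_instance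
def pvWitness_solve : List Int × Int := ([3, 5, 1, 2], 4)

def Spec_solve (d : List Int) (k : Int) (out : Int) : Prop := out = solve_alt d k
instance (d : List Int) (k : Int) (out : Int) : Decidable (Spec_solve d k out) := by unfold Spec_solve; infer_instance

-- ===== CLAIM (what is proved, stated in full; the proofs are below) =====
def Claim_equal_solve : Prop := ∀ (d : List Int) (k : Int), Dom_solve d k → Pre_solve d k → Spec_solve d k (solve d k)

-- ===== LEMMAS AND PROOFS =====

-- the count of residue t among d's elements mod k
def resCount (d : List Int) (k t : Int) : Int :=
  ((d.map (fun x => PySem.Int.mod x k)).count t : Int)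

-- what iteration i of A's outer loop adds to nboxes, divided by 2
def contrib (c : Int → Int) (k i : Int) : Int :=
  if i = 0 ∨ 2 * i = k then PySem.Int.floordiv (c i) 2
  else if 2 * i < k then min (c i) (c (k - i))
  else 0

-- generic: a fold whose body fixes every state is the identity
lemma foldl_fixed {α β : Type} (f : α → β → α) (l : List β) (s : α)
    (h : ∀ j ∈ l, ∀ st, f st j = st) : l.foldl f s = s := by
  induction l generalizing s with
  | nil => rfl
  | cons a t ih => simp only [List.foldl_cons, h a (by simp)]; exact ih s (fun j hj st => h j (by simp [hj]) st)

-- getD after set, in-range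
lemma getD_set_eq {l : List Int} {a : Nat} (v : Int) (n : Nat) (ha : a < l.length) :
    (l.set a v).getD n 0 = if n = a then v else l.getD n 0 := by
  by_cases h : n = a
  · subst h; simp [List.getD_eq_getElem?_getD, ha]
  · simp [List.getD_eq_getElem?_getD, List.getElem?_set_ne (fun hh => h hh.symm), h]

lemma mod_pos_bounds (x k : Int) (hk : 1 ≤ k) :
    0 ≤ PySem.Int.mod x k ∧ PySem.Int.mod x k < k := by
  rw [PySem.Int.mod_eq_emod_of_pos (by omega)]
  exact ⟨Int.emod_nonneg x (by omega), Int.emod_lt_of_pos x (by omega)⟩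

lemma countLoop_length (k : Int) (l : List Int) (mc : List Int) :
    (l.foldl (fun mc x =>
      let m := (PySem.Int.mod x k).toNat
      mc.set m (mc.getD m 0 + 1)) mc).length = mc.length := by
  induction l generalizing mc with
  | nil => rfl
  | cons a t ih => simp only [List.foldl_cons]; rw [ih]; simp

lemma countLoop_getD (k : Int) (hk : 1 ≤ k) (l : List Int) :
    ∀ (mc : List Int), mc.length = k.toNat → ∀ (t : Int), 0 ≤ t → t < k →
    (l.foldl (fun mc x =>
      let m := (PySem.Int.mod x k).toNat
      mc.set m (mc.getD m 0 + 1)) mc).getD t.toNat 0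
      = mc.getD t.toNat 0 + ((l.map (fun x => PySem.Int.mod x k)).count t : Int) := by
  induction l with
  | nil => intro mc _ t _ _; simp
  | cons a rest ih =>
    intro mc hlen t ht0 htk
    obtain ⟨hm0, hmk⟩ := mod_pos_bounds a k hk
    have hin : (PySem.Int.mod a k).toNat < mc.length := by omega
    simp only [List.foldl_cons]
    rw [ih _ (by rw [List.length_set]; exact hlen) t ht0 htk]
    rw [getD_set_eq _ _ hin]
    simp only [List.map_cons, List.count_cons]
    by_cases h : t.toNat = (PySem.Int.mod a k).toNat
    · have : PySem.Int.mod a k = t := by omega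
      simp [this]
      ring
    · have : ¬ (PySem.Int.mod a k == t) = true := by simp; omega
      simp [h, this]

lemma solveCount_getD (d : List Int) (k : Int) (hk : 1 ≤ k) (t : Int) (h0 : 0 ≤ t) (htk : t < k) :
    (solveCount d k).getD t.toNat 0 = resCount d k t := by
  unfold solveCount resCount
  rw [countLoop_getD k hk d _ (by simp) t h0 htk]
  have h2 : (List.replicate k.toNat (0:Int)).getD t.toNat 0 = 0 := by
    simp [List.getD_eq_getElem?_getD, List.getElem?_replicate]; split <;> rfl
  rw [h2]; ring

lemma solveCount_length (d : List Int) (k : Int) : (solveCount d k).length = k.toNat := by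
  unfold solveCount; rw [countLoop_length]; simp

lemma resCount_nonneg (d : List Int) (k t : Int) : 0 ≤ resCount d k t := by
  unfold resCount; positivity

lemma innerBody_skip (k i : Int) (st : List Int × Int) (j : Int)
    (h : PySem.Int.mod (i + j) k ≠ 0) : innerBody k i st j = st := by
  unfold innerBody; rw [if_pos (Or.inl h)]

lemma modsmall (k a : Int) (hk : 1 ≤ k) (h1 : 0 ≤ a) (h2 : a < k) :
    PySem.Int.mod a k = a := by
  rw [PySem.Int.mod_eq_emod_of_pos (by omega)]; exact Int.emod_eq_of_lt h1 h2

lemma modmid (k a : Int) (hk : 1 ≤ k) (h1 : k < a) (h2 : a < 2 * k) :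
    PySem.Int.mod a k = a - k := by
  rw [PySem.Int.mod_eq_emod_of_pos (by omega)]
  have h3 : (a - k) % k = a % k := Int.sub_emod_right a k
  rw [← h3]; exact Int.emod_eq_of_lt (by omega) (by omega)

lemma modk (k : Int) (hk : 1 ≤ k) : PySem.Int.mod k k = 0 := by
  rw [PySem.Int.mod_eq_emod_of_pos (by omega)]; exact Int.emod_self

lemma fd_zero_two : PySem.Int.floordiv 0 2 = 0 := rfl

lemma inner_eval (c : Int → Int) (hcnn : ∀ t, 0 ≤ c t) (k m : Int) (hk : 1 ≤ k)
    (hm0 : 0 ≤ m) (hmk : m < k) (mc : List Int) (nb : Int)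
    (hlen : mc.length = k.toNat)
    (hmc : ∀ t, m ≤ t → t ≤ k - m → t < k → mc.getD t.toNat 0 = c t) :
    ∃ mc', solveInner k m (mc, nb) = (mc', nb + 2 * contrib c k m)
      ∧ mc'.length = k.toNat
      ∧ (∀ t, m + 1 ≤ t → t ≤ k - (m + 1) → t < k → mc'.getD t.toNat 0 = c t) := by
  rcases eq_or_lt_of_le hm0 with hm0' | hmpos
  · -- m = 0 : the only matching j is 0 (self-pairing of residue 0)
    subst hm0'
    have hcons : PySem.List.pyRange 0 k 1 = 0 :: PySem.List.pyRange 1 k 1 :=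
      PySem.List.pyRange_one_cons (by omega)
    have htail : ∀ st, (PySem.List.pyRange 1 k 1).foldl (innerBody k 0) st = st := by
      intro st; apply foldl_fixed; intro j hj st'
      rw [PySem.List.mem_pyRange_one] at hj
      apply innerBody_skip
      rw [zero_add, modsmall k j hk (by omega) (by omega)]; omega
    have hread : mc.getD (0:Int).toNat 0 = c 0 := hmc 0 le_rfl (by omega) (by omega)
    have hcontrib : contrib c k 0 = PySem.Int.floordiv (c 0) 2 := by
      unfold contrib; rw [if_pos (Or.inl rfl)]
    have hmod0 : PySem.Int.mod ((0:Int) + 0) k = 0 := by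
      rw [add_zero]; exact modsmall k 0 hk le_rfl (by omega)
    unfold solveInner
    rw [hcons]; simp only [List.foldl_cons]
    by_cases hc0 : c 0 = 0
    · have hstep : innerBody k 0 (mc, nb) 0 = (mc, nb) := by
        unfold innerBody
        rw [if_pos (Or.inr (Or.inl (hread.trans hc0)))]
      rw [hstep, htail]
      refine ⟨mc, ?_, hlen, fun t h1 h2 h3 => hmc t (by omega) (by omega) h3⟩
      rw [hcontrib, hc0, fd_zero_two]; norm_num
    · set b := PySem.Int.floordiv (c 0) 2 with hb
      have hguard : ¬ (PySem.Int.mod ((0:Int) + 0) k ≠ 0 ∨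
          mc.getD (0:Int).toNat 0 = 0 ∨ mc.getD (0:Int).toNat 0 = 0) := by
        push_neg
        exact ⟨hmod0, fun hh => hc0 (hread.symm.trans hh), fun hh => hc0 (hread.symm.trans hh)⟩
      have hstep : innerBody k 0 (mc, nb) 0 =
          ((mc.set (0:Int).toNat (c 0 - b)).set (0:Int).toNat (c 0 - b - b), nb + 2 * b) := by
        unfold innerBody
        rw [if_neg hguard]
        dsimp only
        rw [if_pos (rfl : (0:Int) = 0)]
        rw [show mc.getD (Int.toNat 0) 0 = c 0 from hread]
        rw [getD_set_eq (c 0 - b) (Int.toNat 0) (by omega)]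
        rw [if_pos rfl]
      rw [hstep, htail]
      refine ⟨_, by rw [hcontrib], by simp [hlen], ?_⟩
      intro t h1 h2 h3
      have htn : ¬ t.toNat = (0:Int).toNat := by omega
      rw [getD_set_eq _ _ (by simp; omega), if_neg htn,
          getD_set_eq _ _ (by omega), if_neg htn]
      exact hmc t (by omega) (by omega) h3
  · -- 1 ≤ m
    rcases lt_trichotomy (2 * m) k with h2m | h2m | h2m
    · -- 1 ≤ m, 2m < k : the only matching j is k - m
      have hmne : m ≠ k - m := by omega
      have hsplit : PySem.List.pyRange m k 1
          = PySem.List.pyRange m (k - m) 1 ++ PySem.List.pyRange (k - m) k 1 :=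
        PySem.List.pyRange_one_append m (k - m) k (by omega) (by omega)
      have hcons : PySem.List.pyRange (k - m) k 1 = (k - m) :: PySem.List.pyRange (k - m + 1) k 1 :=
        PySem.List.pyRange_one_cons (by omega)
      have hseg1 : ∀ st, (PySem.List.pyRange m (k - m) 1).foldl (innerBody k m) st = st := by
        intro st; apply foldl_fixed; intro j hj st'
        rw [PySem.List.mem_pyRange_one] at hj
        apply innerBody_skip
        rw [modsmall k (m + j) hk (by omega) (by omega)]; omega
      have hseg3 : ∀ st, (PySem.List.pyRange (k - m + 1) k 1).foldl (innerBody k m) st = st := by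
        intro st; apply foldl_fixed; intro j hj st'
        rw [PySem.List.mem_pyRange_one] at hj
        apply innerBody_skip
        rw [modmid k (m + j) hk (by omega) (by omega)]; omega
      have hmodk : PySem.Int.mod (m + (k - m)) k = 0 := by
        rw [show m + (k - m) = k by ring]; exact modk k hk
      have hreadm : mc.getD m.toNat 0 = c m := hmc m le_rfl (by omega) (by omega)
      have hreadj : mc.getD (k - m).toNat 0 = c (k - m) :=
        hmc (k - m) (by omega) (by omega) (by omega)
      have hcontrib : contrib c k m = min (c m) (c (k - m)) := by
        unfold contrib
        rw [if_neg (by push_neg; constructor <;> omega), if_pos h2m]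
      unfold solveInner
      rw [hsplit, List.foldl_append, hseg1, hcons]; simp only [List.foldl_cons]
      by_cases hz : c m = 0 ∨ c (k - m) = 0
      · have hmin : min (c m) (c (k - m)) = 0 := by
          have := hcnn m; have := hcnn (k - m); omega
        have hstep : innerBody k m (mc, nb) (k - m) = (mc, nb) := by
          unfold innerBody
          rcases hz with hz | hz
          · rw [if_pos (Or.inr (Or.inl (hreadm.trans hz)))]
          · rw [if_pos (Or.inr (Or.inr (hreadj.trans hz)))]
        rw [hstep, hseg3]
        refine ⟨mc, ?_, hlen, fun t h1 h2 h3 => hmc t (by omega) (by omega) h3⟩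
        rw [hcontrib, hmin]; norm_num
      · push_neg at hz
        set b := min (c m) (c (k - m)) with hb
        have hguard : ¬ (PySem.Int.mod (m + (k - m)) k ≠ 0 ∨
            mc.getD m.toNat 0 = 0 ∨ mc.getD (k - m).toNat 0 = 0) := by
          push_neg
          exact ⟨hmodk, fun hh => hz.1 (hreadm.symm.trans hh),
            fun hh => hz.2 (hreadj.symm.trans hh)⟩
        have hstep : innerBody k m (mc, nb) (k - m) =
            ((mc.set m.toNat (c m - b)).set (k - m).toNat (c (k - m) - b), nb + 2 * b) := by
          unfold innerBody
          rw [if_neg hguard]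
          dsimp only
          rw [if_neg hmne, hreadm, hreadj, ← hb]
          rw [getD_set_eq (c m - b) (k - m).toNat (by omega),
              if_neg (by omega : ¬ (k - m).toNat = m.toNat)]
          rw [hreadj]
        rw [hstep, hseg3]
        refine ⟨_, by rw [hcontrib], by simp [hlen], ?_⟩
        intro t h1 h2 h3
        rw [getD_set_eq _ _ (by simp; omega), if_neg (by omega),
            getD_set_eq _ _ (by omega), if_neg (by omega)]
        exact hmc t (by omega) (by omega) h3
    · -- 2m = k : self-pairing of residue k/2
      have hcons : PySem.List.pyRange m k 1 = m :: PySem.List.pyRange (m + 1) k 1 :=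
        PySem.List.pyRange_one_cons (by omega)
      have htail : ∀ st, (PySem.List.pyRange (m + 1) k 1).foldl (innerBody k m) st = st := by
        intro st; apply foldl_fixed; intro j hj st'
        rw [PySem.List.mem_pyRange_one] at hj
        apply innerBody_skip
        rw [modmid k (m + j) hk (by omega) (by omega)]; omega
      have hmodk : PySem.Int.mod (m + m) k = 0 := by
        rw [show m + m = k by omega]; exact modk k hk
      have hread : mc.getD m.toNat 0 = c m := hmc m le_rfl (by omega) (by omega)
      have hcontrib : contrib c k m = PySem.Int.floordiv (c m) 2 := by
        unfold contrib; rw [if_pos (Or.inr h2m)]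
      unfold solveInner
      rw [hcons]; simp only [List.foldl_cons]
      by_cases hc0 : c m = 0
      · have hstep : innerBody k m (mc, nb) m = (mc, nb) := by
          unfold innerBody
          rw [if_pos (Or.inr (Or.inl (hread.trans hc0)))]
        rw [hstep, htail]
        refine ⟨mc, ?_, hlen, fun t h1 h2 h3 => by omega⟩
        rw [hcontrib, hc0, fd_zero_two]; norm_num
      · set b := PySem.Int.floordiv (c m) 2 with hb
        have hguard : ¬ (PySem.Int.mod (m + m) k ≠ 0 ∨
            mc.getD m.toNat 0 = 0 ∨ mc.getD m.toNat 0 = 0) := by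
          push_neg
          exact ⟨hmodk, fun hh => hc0 (hread.symm.trans hh), fun hh => hc0 (hread.symm.trans hh)⟩
        have hstep : innerBody k m (mc, nb) m =
            ((mc.set m.toNat (c m - b)).set m.toNat (c m - b - b), nb + 2 * b) := by
          unfold innerBody
          rw [if_neg hguard]
          dsimp only
          rw [if_pos (rfl : m = m), hread]
          rw [getD_set_eq (c m - b) m.toNat (by omega), if_pos rfl]
        rw [hstep, htail]
        exact ⟨_, by rw [hcontrib], by simp [hlen], fun t h1 h2 h3 => by omega⟩
    · -- 2m > k : no j in [m, k) matches, the whole inner loop is a no-op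
      have hall : ∀ st, (PySem.List.pyRange m k 1).foldl (innerBody k m) st = st := by
        intro st; apply foldl_fixed; intro j hj st'
        rw [PySem.List.mem_pyRange_one] at hj
        apply innerBody_skip
        rw [modmid k (m + j) hk (by omega) (by omega)]; omega
      have hcontrib : contrib c k m = 0 := by
        unfold contrib
        rw [if_neg (by push_neg; constructor <;> omega), if_neg (by omega)]
      unfold solveInner
      rw [hall]
      refine ⟨mc, ?_, hlen, fun t h1 h2 h3 => hmc t (by omega) (by omega) h3⟩
      rw [hcontrib]; norm_num

lemma altCount_getD (d : List Int) (k t : Int) :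
    (altCount d k).getD t 0 = resCount d k t := by
  unfold altCount
  have h1 : (d.foldl (fun (c : PySem.Dict Int Int) x =>
      let r := PySem.Int.mod x k
      c.insert r (c.getD r 0 + 1)) PySem.Dict.empty)
      = ((d.map (fun x => PySem.Int.mod x k)).foldl
          (fun (c : PySem.Dict Int Int) r => c.insert r (c.getD r 0 + 1)) PySem.Dict.empty) := by
    rw [List.foldl_map]
  rw [h1, PySem.Dict.getD_foldl_insert_add_one, PySem.Dict.getD_empty]
  simp [resCount]

lemma outer_eval (c : Int → Int) (hcnn : ∀ t, 0 ≤ c t) (k : Int) (hk : 1 ≤ k) :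
    ∀ (n : Nat) (m : Int), (k - m).toNat = n → 0 ≤ m → m ≤ k →
    ∀ (mc : List Int) (nb : Int), mc.length = k.toNat →
    (∀ t, m ≤ t → t ≤ k - m → t < k → mc.getD t.toNat 0 = c t) →
    ((PySem.List.pyRange m k 1).foldl (fun st i => solveInner k i st) (mc, nb)).2
      = nb + ((PySem.List.pyRange m k 1).map (fun i => 2 * contrib c k i)).sum := by
  intro n
  induction n with
  | zero =>
    intro m hn h0 hmk mc nb hlen hmc
    rw [PySem.List.pyRange_one_eq_nil (by omega)]
    simp
  | succ n ih =>
    intro m hn h0 hmk mc nb hlen hmc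
    have hmlt : m < k := by omega
    rw [PySem.List.pyRange_one_cons (by omega : m < k)]
    simp only [List.foldl_cons, List.map_cons, List.sum_cons]
    obtain ⟨mc', hstep, hlen', hmc'⟩ := inner_eval c hcnn k m hk h0 hmlt mc nb hlen hmc
    rw [hstep,
      ih (m + 1) (by omega) (by omega) (by omega) mc' (nb + 2 * contrib c k m) hlen' hmc']
    ring

lemma solveA_eq_sum (d : List Int) (k : Int) (hk : 1 ≤ k) :
    solve d k = ((PySem.List.pyRange 0 k 1).map (fun i => 2 * contrib (resCount d k) k i)).sum := by
  unfold solve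
  rw [outer_eval (resCount d k) (resCount_nonneg d k) k hk (k - 0).toNat 0 rfl le_rfl (by omega)
      (solveCount d k) 0 (solveCount_length d k)
      (fun t h1 h2 h3 => solveCount_getD d k hk t h1 h3)]
  ring

lemma solveB_eq (d : List Int) (k : Int) :
    solve_alt d k =
      (if PySem.Int.mod k 2 = 0
       then 2 * PySem.Int.floordiv (resCount d k 0) 2
            + 2 * PySem.Int.floordiv (resCount d k (PySem.Int.floordiv k 2)) 2
       else 2 * PySem.Int.floordiv (resCount d k 0) 2)
      + ((PySem.List.pyRange 1 (PySem.Int.floordiv (k + 1) 2) 1).map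
          (fun i => 2 * min (resCount d k i) (resCount d k (k - i)))).sum := by
  unfold solve_alt
  simp only [altCount_getD]
  rw [PySem.List.foldl_add]

lemma sum_contrib (c : Int → Int) (k : Int) (hk : 1 ≤ k) :
    ((PySem.List.pyRange 0 k 1).map (fun i => 2 * contrib c k i)).sum
    = (if PySem.Int.mod k 2 = 0
       then 2 * PySem.Int.floordiv (c 0) 2 + 2 * PySem.Int.floordiv (c (PySem.Int.floordiv k 2)) 2
       else 2 * PySem.Int.floordiv (c 0) 2)
      + ((PySem.List.pyRange 1 (PySem.Int.floordiv (k + 1) 2) 1).map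
          (fun i => 2 * min (c i) (c (k - i)))).sum := by
  have hfd1 : PySem.Int.floordiv (k + 1) 2 = (k + 1) / 2 :=
    PySem.Int.floordiv_eq_ediv_of_pos (by omega)
  have hfd2 : PySem.Int.floordiv k 2 = k / 2 := PySem.Int.floordiv_eq_ediv_of_pos (by omega)
  have hmod2 : PySem.Int.mod k 2 = k % 2 := PySem.Int.mod_eq_emod_of_pos (by omega)
  rw [hfd1, hfd2, hmod2]
  have h1 : (1:Int) ≤ (k + 1) / 2 := by omega
  have h2 : (k + 1) / 2 ≤ k := by omega
  have e1 : PySem.List.pyRange 0 k 1 = PySem.List.pyRange 0 1 1 ++ PySem.List.pyRange 1 k 1 :=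
    PySem.List.pyRange_one_append 0 1 k (by omega) (by omega)
  have e2 : PySem.List.pyRange 1 k 1
      = PySem.List.pyRange 1 ((k + 1) / 2) 1 ++ PySem.List.pyRange ((k + 1) / 2) k 1 :=
    PySem.List.pyRange_one_append 1 ((k + 1) / 2) k h1 h2
  have e0 : PySem.List.pyRange 0 1 1 = [0] := by
    rw [PySem.List.pyRange_one_cons (by omega), PySem.List.pyRange_one_eq_nil (by omega)]
  rw [e1, e2, e0, List.map_append, List.map_append, List.sum_append, List.sum_append]
  have hc0 : contrib c k 0 = PySem.Int.floordiv (c 0) 2 := by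
    unfold contrib; rw [if_pos (Or.inl rfl)]
  have hmid : (PySem.List.pyRange 1 ((k + 1) / 2) 1).map (fun i => 2 * contrib c k i)
      = (PySem.List.pyRange 1 ((k + 1) / 2) 1).map (fun i => 2 * min (c i) (c (k - i))) := by
    apply List.map_congr_left
    intro i hi
    rw [PySem.List.mem_pyRange_one] at hi
    unfold contrib
    rw [if_neg (by push_neg; constructor <;> omega), if_pos (by omega)]
  rw [hmid]
  have hzsum : ∀ (l : List Int), (l.map (fun _ => (0:Int))).sum = 0 := by intro l; simp
  simp only [List.map_cons, List.map_nil, List.sum_cons, List.sum_nil]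
  by_cases hpar : k % 2 = 0
  · -- k even: the tail [ (k+1)/2, k ) starts with k/2 and the rest contributes 0
    have hhalf : (k + 1) / 2 = k / 2 := by omega
    have hlt : (k + 1) / 2 < k := by omega
    rw [PySem.List.pyRange_one_cons hlt]
    have htail : (PySem.List.pyRange ((k + 1) / 2 + 1) k 1).map (fun i => 2 * contrib c k i)
        = (PySem.List.pyRange ((k + 1) / 2 + 1) k 1).map (fun _ => (0:Int)) := by
      apply List.map_congr_left
      intro i hi
      rw [PySem.List.mem_pyRange_one] at hi
      unfold contrib
      rw [if_neg (by push_neg; constructor <;> omega), if_neg (by omega)]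
      ring
    have hch : contrib c k ((k + 1) / 2) = PySem.Int.floordiv (c (k / 2)) 2 := by
      unfold contrib
      rw [if_pos (Or.inr (by omega)), hhalf]
    simp only [List.map_cons, List.sum_cons]
    rw [htail, hzsum, hch, hc0, if_pos hpar]
    ring
  · -- k odd: the whole tail contributes 0
    have htail : (PySem.List.pyRange ((k + 1) / 2) k 1).map (fun i => 2 * contrib c k i)
        = (PySem.List.pyRange ((k + 1) / 2) k 1).map (fun _ => (0:Int)) := by
      apply List.map_congr_left
      intro i hi
      rw [PySem.List.mem_pyRange_one] at hi
      unfold contrib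
      rw [if_neg (by push_neg; constructor <;> omega), if_neg (by omega)]
      ring
    rw [htail, hzsum, hc0, if_neg hpar]
    ring


-- ===== VERDICT (by name: the statement is the Claim_ definition above) =====
theorem solve_spec : Claim_equal_solve := by
  intro d k _ hpre
  unfold Spec_solve
  by_cases hk : 1 ≤ k
  · rw [solveA_eq_sum d k hk, solveB_eq d k, sum_contrib (resCount d k) k hk]
  · have hd : d = [] := by
      rcases hpre with h | h
      · omega
      · exact h
    subst hd
    have hA : solve [] k = 0 := by
      unfold solve
      rw [PySem.List.pyRange_one_eq_nil (by omega)]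
      rfl
    have hB : solve_alt [] k = 0 := by
      unfold solve_alt
      rw [PySem.List.pyRange_one_eq_nil
        (by rw [PySem.Int.floordiv_eq_ediv_of_pos (by omega)]; omega)]
      have hcnt : altCount [] k = PySem.Dict.empty := rfl
      simp only [List.foldl_nil, hcnt, PySem.Dict.getD_empty, fd_zero_two]
      split_ifs <;> norm_num
    rw [hA, hB]
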